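-- pv_equiv track=rewrite | github.com/HyperStudioX/HyperAgent | api/app/agents/supervisor.py | _path_has_streamable_node
-- ===== SOURCE A (Python) =====
-- STREAMING_CONFIG = {
--     "summarize": True,
--     "agent": True,
--     "generate": False,  # Code generation - internal step, don't stream to chat
--     "synthesize": True,
--     "analyze": False,   # Analysis step - internal, only show final summary
--     "router": False,
--     "tools": False,
--     "search_agent": False,
--     "search_tools": False,
--     # Research subgraph nodes
--     "research_prep": False,
--     "research_post": False,
--     "init_config": False,
--     "collect_sources": False,
-- }
--
-- def _node_matches_streaming(node_name: str, node_key: str) -> bool: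
--     """Check if a node name matches a streaming config key."""
--     return node_name == node_key or node_name.endswith(f":{node_key}")
--
-- def _path_has_streamable_node(node_path_str: str) -> bool:
--     """Check if any node in the current path should stream."""
--     if not node_path_str:
--         return False
--     for segment in node_path_str.split("/"):
--         for node, enabled in STREAMING_CONFIG.items():
--             if enabled and _node_matches_streaming(segment, node):
--                 return True
--     return False
-- ===== SOURCE B (Python) =====
-- _ENABLED_KEYS = ("summarize", "agent", "synthesize")
--
--
-- def _path_has_streamable_node(node_path_str: str) -> bool:
--     """Check if any node in the current path should stream."""
--     s = node_path_str
--     n = len(s)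
--     for key in _ENABLED_KEYS:
--         k = len(key)
--         for i in range(n):
--             if (s[i:i + k] == key
--                     and (i == 0 or s[i - 1] in "/:")
--                     and (i + k == n or s[i + k] == "/")):
--                 return True
--     return False
-- ===== Notes on version B (the rewrite author's own statement) =====
-- stated objective: alternative
-- what changed: B never splits the path into segments: instead of A's separator-split with a nested scan over all 13 STREAMING_CONFIG entries per segment, it runs a boundary-checked substring search over the raw string, testing each position for an occurrence of one of the three enabled keys that starts right after a separator, a colon or the start of the string and ends right before a separator or the end of the string.
import Mathlib
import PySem

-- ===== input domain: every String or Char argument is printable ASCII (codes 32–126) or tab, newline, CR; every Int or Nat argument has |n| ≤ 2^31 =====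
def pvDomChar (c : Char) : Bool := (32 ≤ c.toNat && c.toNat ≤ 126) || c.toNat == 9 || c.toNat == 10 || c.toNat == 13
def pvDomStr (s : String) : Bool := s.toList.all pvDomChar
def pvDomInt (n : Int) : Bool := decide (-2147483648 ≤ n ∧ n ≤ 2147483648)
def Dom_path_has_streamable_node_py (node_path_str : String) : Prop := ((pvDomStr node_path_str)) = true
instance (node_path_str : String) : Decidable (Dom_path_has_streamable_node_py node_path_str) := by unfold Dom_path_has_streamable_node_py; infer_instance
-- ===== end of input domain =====

-- B replaces A's split('/') plus nested scan over STREAMING_CONFIG by a boundary-checked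
-- substring search over the raw string for the three enabled keys (objective: alternative).


-- ===== PORT A =====
-- STREAMING_CONFIG (a dict literal; insertion order)
def pvStreamingConfig : List (List Char × Bool) :=
  [("summarize".toList, true), ("agent".toList, true), ("generate".toList, false),
   ("synthesize".toList, true), ("analyze".toList, false), ("router".toList, false),
   ("tools".toList, false), ("search_agent".toList, false), ("search_tools".toList, false),
   ("research_prep".toList, false), ("research_post".toList, false),
   ("init_config".toList, false), ("collect_sources".toList, false)]

def pvNodeMatchesStreaming (nodeName nodeKey : List Char) : Bool :=
  nodeName == nodeKey || PySem.Chars.endswith nodeName (':' :: nodeKey)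

def path_has_streamable_node_py (node_path_str : String) : Bool :=
  if node_path_str.toList = [] then false
  else
    (PySem.Chars.splitOn node_path_str.toList ['/']).any (fun segment =>
      pvStreamingConfig.any (fun p => p.2 && pvNodeMatchesStreaming segment p.1))

-- ===== PORT B =====
-- the three enabled keys of STREAMING_CONFIG, precomputed
def pvEnabledKeys : List (List Char) :=
  ["summarize".toList, "agent".toList, "synthesize".toList]

def path_has_streamable_node_py_alt (node_path_str : String) : Bool :=
  let s := node_path_str.toList
  let n := s.length
  pvEnabledKeys.any (fun key =>
    (List.range n).any (fun i =>
      (PySem.List.slice s (some (i : Int)) (some ((i : Int) + key.length)) == key)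
      && ((i == 0) || (match PySem.List.pyGet? s ((i : Int) - 1) with
            | some c => PySem.Chars.isIn [c] ['/', ':']
            | none => false))
      && ((i + key.length == n) || (match PySem.List.pyGet? s ((i : Int) + key.length) with
            | some c => c == '/'
            | none => false))))


-- ===== PRECONDITION & SPEC =====
def Spec_path_has_streamable_node_py (node_path_str : String) (out : Bool) : Prop := out = path_has_streamable_node_py_alt node_path_str
instance (node_path_str : String) (out : Bool) : Decidable (Spec_path_has_streamable_node_py node_path_str out) := by unfold Spec_path_has_streamable_node_py; infer_instance

-- ===== CLAIM (what is proved, stated in full; the proofs are below) =====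
def Claim_equal_path_has_streamable_node_py : Prop := ∀ (node_path_str : String), Dom_path_has_streamable_node_py node_path_str → Spec_path_has_streamable_node_py node_path_str (path_has_streamable_node_py node_path_str)

-- ===== LEMMAS AND PROOFS =====

def pvSplit : List Char → List (List Char)
  | [] => [[]]
  | c :: cs => if c = '/' then [] :: pvSplit cs
               else match pvSplit cs with
                 | [] => [[c]]
                 | s :: ss => (c :: s) :: ss

lemma pvSplit_ne_nil (cs : List Char) : pvSplit cs ≠ [] := by
  induction cs with
  | nil => simp [pvSplit]
  | cons c cs ih =>
    simp only [pvSplit]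
    split_ifs
    · simp
    · cases h : pvSplit cs <;> simp

lemma go_eq : ∀ (l : List Char) (fuel : Nat) (cur : List Char) (acc : List (List Char)),
    l.length < fuel →
    PySem.Chars.splitOn.go ['/'] fuel l cur acc =
      acc.reverse ++ (match pvSplit l with
        | [] => []
        | s :: ss => (cur.reverse ++ s) :: ss) := by
  intro l
  induction l with
  | nil =>
    intro fuel cur acc h
    match fuel with
    | f + 1 => simp [PySem.Chars.splitOn.go, pvSplit]
  | cons c rest ih =>
    intro fuel cur acc h
    match fuel with
    | f + 1 =>
      rw [PySem.Chars.splitOn.go]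
      by_cases hc : c = '/'
      · subst hc
        have hp : List.isPrefixOf ['/'] ('/' :: rest) = true := by simp [List.isPrefixOf]
        rw [if_pos hp]
        simp only [List.length, List.drop_succ_cons, List.drop_zero]
        rw [ih f [] (cur.reverse :: acc) (by simpa using Nat.lt_of_succ_lt_succ h)]
        have := pvSplit_ne_nil rest
        cases hr : pvSplit rest with
        | nil => exact absurd hr this
        | cons s ss => simp [pvSplit, hr]
      · have hp : List.isPrefixOf ['/'] (c :: rest) = false := by
          simp [List.isPrefixOf]; exact fun h' => absurd h'.symm hc
        rw [if_neg (by simp [hp])]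
        rw [ih f (c :: cur) acc (by simpa using Nat.lt_of_succ_lt_succ h)]
        have := pvSplit_ne_nil rest
        cases hr : pvSplit rest with
        | nil => exact absurd hr this
        | cons s ss => simp [pvSplit, hr, hc]

lemma splitOn_eq (cs : List Char) : PySem.Chars.splitOn cs ['/'] = pvSplit cs := by
  unfold PySem.Chars.splitOn
  rw [go_eq cs (cs.length + 1) [] [] (Nat.lt_succ_self _)]
  have := pvSplit_ne_nil cs
  cases hr : pvSplit cs with
  | nil => exact absurd hr this
  | cons s ss => simp

def pvOcc (K cs : List Char) : Prop :=
  ∃ l r, cs = l ++ K ++ r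
    ∧ (l = [] ∨ l.getLast? = some '/' ∨ l.getLast? = some ':')
    ∧ (r = [] ∨ r.head? = some '/')

lemma pvSplit_no_slash {a : List Char} (h : '/' ∉ a) : pvSplit a = [a] := by
  induction a with
  | nil => rfl
  | cons c cs ih =>
    have hc : c ≠ '/' := fun e => h (e ▸ List.mem_cons_self ..)
    have hcs : '/' ∉ cs := fun e => h (List.mem_cons_of_mem _ e)
    simp [pvSplit, hc, ih hcs]

lemma pvSplit_append_slash {a : List Char} (b : List Char) (h : '/' ∉ a) :
    pvSplit (a ++ '/' :: b) = a :: pvSplit b := by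
  induction a with
  | nil =>
    simp [pvSplit]
  | cons c cs ih =>
    have hc : c ≠ '/' := fun e => h (e ▸ List.mem_cons_self ..)
    have hcs : '/' ∉ cs := fun e => h (List.mem_cons_of_mem _ e)
    simp [pvSplit, hc, ih hcs]

-- first-slash decomposition
lemma exists_first_slash {cs : List Char} (h : '/' ∈ cs) :
    ∃ a b, cs = a ++ '/' :: b ∧ '/' ∉ a := by
  induction cs with
  | nil => simp at h
  | cons c cs ih =>
    by_cases hc : c = '/'
    · exact ⟨[], cs, by simp [hc], by simp⟩
    · have : '/' ∈ cs := by
        rcases List.mem_cons.mp h with h1 | h1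
        · exact absurd h1.symm hc
        · exact h1
      obtain ⟨a, b, hab, hna⟩ := ih this
      exact ⟨c :: a, b, by simp [hab], by
        intro hm
        rcases List.mem_cons.mp hm with h1 | h1
        · exact hc h1.symm
        · exact hna h1⟩

def pvMatchP (K seg : List Char) : Prop := seg = K ∨ ∃ p, seg = p ++ ':' :: K

lemma occ_no_slash {K cs : List Char} (hcs : '/' ∉ cs) :
    pvOcc K cs ↔ pvMatchP K cs := by
  constructor
  · rintro ⟨l, r, hdecomp, hL, hR⟩
    have hr : r = [] := by
      rcases hR with hr | hr
      · exact hr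
      · exfalso
        cases r with
        | nil => simp at hr
        | cons x t =>
          simp only [List.head?_cons, Option.some.injEq] at hr
          exact hcs (hdecomp ▸ (by simp [hr]))
    subst hr
    rcases hL with hl | hl | hl
    · exact Or.inl (by simpa [hl] using hdecomp)
    · exfalso
      obtain ⟨t, ht⟩ := List.getLast?_eq_some_iff.mp hl
      exact hcs (hdecomp ▸ (by simp [ht]))
    · obtain ⟨t, ht⟩ := List.getLast?_eq_some_iff.mp hl
      exact Or.inr ⟨t, by simpa [ht] using hdecomp⟩
  · rintro (h | ⟨p, hp⟩)
    · exact ⟨[], [], by simp [h], Or.inl rfl, Or.inl rfl⟩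
    · exact ⟨p ++ [':'], [], by simp [hp], Or.inr (Or.inr (by simp)), Or.inl rfl⟩

lemma occ_append_slash {K a : List Char} (b : List Char) (hK : K ≠ []) (hKs : '/' ∉ K)
    (ha : '/' ∉ a) :
    pvOcc K (a ++ '/' :: b) ↔ pvMatchP K a ∨ pvOcc K b := by
  constructor
  · rintro ⟨l, r, hdecomp, hL, hR⟩
    rw [List.append_assoc] at hdecomp
    rcases List.append_eq_append_iff.mp hdecomp.symm with ⟨a', h1, h2⟩ | ⟨c', h1, h2⟩
    · -- a = l ++ a', K ++ r = a' ++ '/' :: b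
      have matchCase : a = l ++ K → pvMatchP K a ∨ pvOcc K b := by
        intro haK
        rcases hL with hl | hl | hl
        · exact Or.inl (Or.inl (by simp [haK, hl]))
        · exfalso
          obtain ⟨t, ht⟩ := List.getLast?_eq_some_iff.mp hl
          exact ha (haK ▸ (by simp [ht]))
        · obtain ⟨t, ht⟩ := List.getLast?_eq_some_iff.mp hl
          exact Or.inl (Or.inr ⟨t, by simp [haK, ht]⟩)
      rcases List.append_eq_append_iff.mp h2 with ⟨w, hw1, hw2⟩ | ⟨w, hw1, hw2⟩
      · -- a' = K ++ w, r = w ++ '/' :: b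
        cases w with
        | nil => exact matchCase (by simp [h1, hw1])
        | cons x w' =>
          exfalso
          have hx : x = '/' := by
            rcases hR with hr | hr
            · simp [hw2] at hr
            · simpa [hw2] using hr
          exact ha (h1 ▸ (by simp [hw1, hx]))
      · -- K = a' ++ w, '/' :: b = w ++ r
        cases w with
        | nil =>
          have haK : a' = K := by simpa using hw1.symm
          exact matchCase (by simp [h1, haK])
        | cons x w' =>
          exfalso
          have hx : x = '/' := by
            have := hw2.symm
            simp only [List.cons_append, List.cons.injEq] at this
            exact this.1
          exact hKs (hw1 ▸ (by simp [hx]))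
    · -- l = a ++ c', '/' :: b = c' ++ (K ++ r)
      cases c' with
      | nil =>
        exfalso
        cases K with
        | nil => exact hK rfl
        | cons k K' =>
          simp only [List.nil_append, List.cons_append, List.cons.injEq] at h2
          exact hKs (by simp [← h2.1])
      | cons x c'' =>
        simp only [List.cons_append, List.cons.injEq] at h2
        refine Or.inr ⟨c'', r, by rw [h2.2, List.append_assoc], ?_, hR⟩
        rcases eq_or_ne c'' [] with hc | hc
        · exact Or.inl hc
        · have hlast : l.getLast? = c''.getLast? := by
            rw [h1, show (x :: c'') = [x] ++ c'' from rfl, ← List.append_assoc]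
            exact List.getLast?_append_of_ne_nil _ hc
          rcases hL with hl | hl | hl
          · exact absurd hl (by simp [h1])
          · exact Or.inr (Or.inl (hlast ▸ hl))
          · exact Or.inr (Or.inr (hlast ▸ hl))
  · rintro (h | ⟨l, r, hd, hL, hR⟩)
    · rcases h with h | ⟨p, hp⟩
      · exact ⟨[], '/' :: b, by simp [h], Or.inl rfl, Or.inr (by simp)⟩
      · exact ⟨p ++ [':'], '/' :: b, by simp [hp], Or.inr (Or.inr (by simp)),
          Or.inr (by simp)⟩
    · refine ⟨a ++ '/' :: l, r, by simp [hd], ?_, hR⟩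
      rcases eq_or_ne l [] with hl | hl
      · exact Or.inr (Or.inl (by simp [hl]))
      · have hlast : (a ++ '/' :: l).getLast? = l.getLast? := by
          rw [show ('/' :: l) = ['/'] ++ l from rfl, ← List.append_assoc]
          exact List.getLast?_append_of_ne_nil _ hl
        rcases hL with h0 | h0 | h0
        · exact absurd h0 hl
        · exact Or.inr (Or.inl (by rw [hlast]; exact h0))
        · exact Or.inr (Or.inr (by rw [hlast]; exact h0))

lemma A_iff (K : List Char) (hK : K ≠ []) (hKs : '/' ∉ K) (cs : List Char) :
    (∃ seg ∈ pvSplit cs, pvMatchP K seg) ↔ pvOcc K cs := by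
  by_cases h : '/' ∈ cs
  · obtain ⟨a, b, hab, hna⟩ := exists_first_slash h
    subst hab
    rw [pvSplit_append_slash b hna, occ_append_slash b hK hKs hna]
    have IH := A_iff K hK hKs b
    simp only [List.mem_cons, exists_eq_or_imp]
    rw [IH]
  · rw [pvSplit_no_slash h, occ_no_slash h]
    simp
termination_by cs.length
decreasing_by subst hab; simp; omega

-- B's per-position hit test, as in the port
def pvCond (cs K : List Char) (i : Nat) : Bool :=
  (PySem.List.slice cs (some (i : Int)) (some ((i : Int) + K.length)) == K)
  && ((i == 0) || (match PySem.List.pyGet? cs ((i : Int) - 1) with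
        | some c => PySem.Chars.isIn [c] ['/', ':']
        | none => false))
  && ((i + K.length == cs.length) || (match PySem.List.pyGet? cs ((i : Int) + K.length) with
        | some c => c == '/'
        | none => false))

lemma isIn_singleton_pair (c : Char) :
    PySem.Chars.isIn [c] ['/', ':'] = (c == '/' || c == ':') := by
  rcases eq_or_ne c '/' with h | h
  · subst h; rw [(PySem.Chars.isIn_iff_infix _ _).mpr (by simp [List.singleton_infix_iff])]; simp
  · rcases eq_or_ne c ':' with h2 | h2
    · subst h2; rw [(PySem.Chars.isIn_iff_infix _ _).mpr (by simp [List.singleton_infix_iff])]; simp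
    · have : PySem.Chars.isIn [c] ['/', ':'] = false := by
        rw [PySem.Chars.isIn_eq_false_iff, List.singleton_infix_iff]
        simp [h, h2]
      simp [this, h, h2]

lemma B_iff (K cs : List Char) (hK : K ≠ []) :
    ((List.range cs.length).any (fun i => pvCond cs K i) = true) ↔ pvOcc K cs := by
  rw [List.any_eq_true]
  constructor
  · rintro ⟨i, hi, hcond⟩
    rw [List.mem_range] at hi
    unfold pvCond at hcond
    simp only [Bool.and_eq_true, Bool.or_eq_true, beq_iff_eq] at hcond
    obtain ⟨⟨hc1, hc2⟩, hc3⟩ := hcond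
    have hslice : (cs.drop i).take K.length = K := by
      have hcast : ((i : Int) + K.length) = ((i + K.length : Nat) : Int) := by push_cast; ring
      rw [hcast, PySem.List.slice_natCast] at hc1
      simpa using hc1
    have hpre : K <+: cs.drop i := hslice ▸ List.take_prefix _ _
    obtain ⟨r, hr⟩ := hpre
    refine ⟨cs.take i, r, by rw [List.append_assoc, hr, List.take_append_drop], ?_, ?_⟩
    · rcases Nat.eq_zero_or_pos i with hz | hpos
      · exact Or.inl (by simp [hz])
      · rcases hc2 with h0 | h0
        · omega
        · obtain ⟨j, rfl⟩ : ∃ j, i = j + 1 := ⟨i - 1, by omega⟩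
          have hcast : (((j + 1 : Nat) : Int) - 1) = ((j : Nat) : Int) := by push_cast; ring
          rw [hcast, PySem.List.pyGet?_natCast,
            List.getElem?_eq_getElem (by omega : j < cs.length)] at h0
          simp only [isIn_singleton_pair, Bool.or_eq_true, beq_iff_eq] at h0
          have htake : (cs.take (j + 1)).getLast? = some cs[j] := by
            rw [List.getLast?_eq_getElem?]
            simp [List.length_take]
            rw [min_eq_left (by omega : j + 1 ≤ cs.length)]
            simp only [Nat.add_sub_cancel]
            exact List.getElem?_eq_getElem (by omega)
          rcases h0 with h0 | h0
          · exact Or.inr (Or.inl (by rw [htake, h0]))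
          · exact Or.inr (Or.inr (by rw [htake, h0]))
    · have hlenr : cs.length - i = K.length + r.length := by
        have := congrArg List.length hr
        simp at this
        omega
      rcases hc3 with h0 | h0
      · refine Or.inl ?_
        have : r.length = 0 := by omega
        exact List.eq_nil_of_length_eq_zero this
      · have hik : i + K.length < cs.length := by
          by_contra hge
          have hcast : ((i : Int) + K.length) = ((i + K.length : Nat) : Int) := by push_cast; ring
          rw [hcast, PySem.List.pyGet?_natCast, List.getElem?_eq_none (by omega)] at h0
          simp at h0
        have hcast : ((i : Int) + K.length) = ((i + K.length : Nat) : Int) := by push_cast; ring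
        rw [hcast, PySem.List.pyGet?_natCast,
          List.getElem?_eq_getElem hik] at h0
        simp only [beq_iff_eq] at h0
        refine Or.inr ?_
        have hrdrop : r = cs.drop (i + K.length) := by
          have h1 : (cs.drop i).drop K.length = r := by rw [← hr, List.drop_left]
          rw [← h1, List.drop_drop]
        rw [hrdrop, List.head?_drop, List.getElem?_eq_getElem hik, h0]
  · rintro ⟨l, r, hd, hL, hR⟩
    have hkpos : 0 < K.length := List.length_pos_iff.mpr hK
    have hlen : cs.length = l.length + K.length + r.length := by simp [hd]; omega
    refine ⟨l.length, List.mem_range.mpr (by omega), ?_⟩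
    unfold pvCond
    simp only [Bool.and_eq_true, Bool.or_eq_true, beq_iff_eq]
    have hdropl : cs.drop l.length = K ++ r := by rw [hd, List.append_assoc, List.drop_left]
    refine ⟨⟨?_, ?_⟩, ?_⟩
    · have hcast : ((l.length : Int) + K.length) = ((l.length + K.length : Nat) : Int) := by
        push_cast; ring
      rw [hcast, PySem.List.slice_natCast, hdropl]
      simp
    · rcases hL with h0 | h0 | h0
      · exact Or.inl (by simp [h0])
      · refine Or.inr ?_
        obtain ⟨t, ht⟩ := List.getLast?_eq_some_iff.mp h0
        have hll : l.length = t.length + 1 := by simp [ht]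
        have hcast : ((l.length : Int) - 1) = ((t.length : Nat) : Int) := by omega
        rw [hcast, PySem.List.pyGet?_natCast]
        have : cs[t.length]? = some '/' := by
          rw [hd, ht]
          rw [List.getElem?_append_left (by simp), List.getElem?_append_left (by simp)]
          rw [List.getElem?_concat_length]
        rw [this]
        simp [isIn_singleton_pair]
      · refine Or.inr ?_
        obtain ⟨t, ht⟩ := List.getLast?_eq_some_iff.mp h0
        have hll : l.length = t.length + 1 := by simp [ht]
        have hcast : ((l.length : Int) - 1) = ((t.length : Nat) : Int) := by omega
        rw [hcast, PySem.List.pyGet?_natCast]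
        have : cs[t.length]? = some ':' := by
          rw [hd, ht]
          rw [List.getElem?_append_left (by simp), List.getElem?_append_left (by simp)]
          rw [List.getElem?_concat_length]
        rw [this]
        simp [isIn_singleton_pair]
    · rcases hR with h0 | h0
      · exact Or.inl (by simp [hlen, h0])
      · refine Or.inr ?_
        have hcast : ((l.length : Int) + K.length) = ((l.length + K.length : Nat) : Int) := by
          push_cast; ring
        rw [hcast, PySem.List.pyGet?_natCast]
        have hdrop2 : cs.drop (l.length + K.length) = r := by
          rw [hd, show l.length + K.length = (l ++ K).length by simp, List.drop_left]
        have : cs[l.length + K.length]? = some '/' := by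
          rw [← List.head?_drop, hdrop2, h0]
        rw [this]
        simp

lemma matchbool (K seg : List Char) :
    (seg == K || PySem.Chars.endswith seg (':' :: K)) = true ↔ pvMatchP K seg := by
  simp only [Bool.or_eq_true, beq_iff_eq, PySem.Chars.endswith_iff, pvMatchP]
  constructor
  · rintro (h | ⟨t, ht⟩)
    · exact Or.inl h
    · exact Or.inr ⟨t, ht.symm⟩
  · rintro (h | ⟨p, hp⟩)
    · exact Or.inl h
    · exact Or.inr ⟨p, hp.symm⟩

set_option maxHeartbeats 1000000 in
lemma innerA_iff (seg : List Char) :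
    (pvStreamingConfig.any (fun p => p.2 && pvNodeMatchesStreaming seg p.1)) = true ↔
      (∃ K ∈ pvEnabledKeys, pvMatchP K seg) := by
  have h1 := matchbool "summarize".toList seg
  have h2 := matchbool "agent".toList seg
  have h3 := matchbool "synthesize".toList seg
  simp only [Bool.or_eq_true, beq_iff_eq] at h1 h2 h3
  simp only [pvStreamingConfig, pvNodeMatchesStreaming, pvEnabledKeys, List.any_cons,
    List.any_nil, Bool.false_and, Bool.true_and, Bool.or_false, Bool.false_or,
    Bool.or_eq_true, List.mem_cons, List.not_mem_nil, or_false, exists_eq_or_imp,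
    exists_eq_left, beq_iff_eq]
  rw [h1, h2, h3]

lemma pv_ports_agree (node_path_str : String) :
    path_has_streamable_node_py node_path_str = path_has_streamable_node_py_alt node_path_str := by
  unfold path_has_streamable_node_py path_has_streamable_node_py_alt
  rw [Bool.eq_iff_iff]
  by_cases h : node_path_str.toList = []
  · rw [if_pos h]
    simp [h, pvEnabledKeys]
  · rw [if_neg h]
    rw [splitOn_eq, List.any_eq_true]
    constructor
    · rintro ⟨seg, hseg, hmatch⟩
      obtain ⟨K, hKmem, hKm⟩ := (innerA_iff seg).mp hmatch
      have hocc : pvOcc K node_path_str.toList :=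
        (A_iff K (by revert hKmem; simp [pvEnabledKeys]; rintro (rfl | rfl | rfl) <;> decide)
          (by revert hKmem; simp [pvEnabledKeys]; rintro (rfl | rfl | rfl) <;> decide)
          node_path_str.toList).mp ⟨seg, hseg, hKm⟩
      rw [List.any_eq_true]
      refine ⟨K, hKmem, ?_⟩
      exact (B_iff K node_path_str.toList
        (by revert hKmem; simp [pvEnabledKeys]; rintro (rfl | rfl | rfl) <;> decide)).mpr hocc
    · intro hB
      rw [List.any_eq_true] at hB
      obtain ⟨K, hKmem, hKany⟩ := hB
      have hKne : K ≠ [] := by revert hKmem; simp [pvEnabledKeys]; rintro (rfl | rfl | rfl) <;> decide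
      have hKns : '/' ∉ K := by revert hKmem; simp [pvEnabledKeys]; rintro (rfl | rfl | rfl) <;> decide
      have hocc : pvOcc K node_path_str.toList := (B_iff K node_path_str.toList hKne).mp hKany
      obtain ⟨seg, hseg, hm⟩ := (A_iff K hKne hKns node_path_str.toList).mpr hocc
      exact ⟨seg, hseg, (innerA_iff seg).mpr ⟨K, hKmem, hm⟩⟩

-- ===== VERDICT (by name: the statement is the Claim_ definition above) =====
theorem path_has_streamable_node_py_spec : Claim_equal_path_has_streamable_node_py := by
  intro node_path_str _
  unfold Spec_path_has_streamable_node_py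
  exact pv_ports_agree node_path_str
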